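-- pv_equiv track=rewrite | github.com/espressif/esp-idf | tools/ci/dynamic_pipelines/scripts/generate_target_test_child_pipeline.py | get_tags_with_amount
-- ===== SOURCE A (Python) =====
-- import typing as t
-- from collections import Counter
--
-- def get_tags_with_amount(s: str) -> t.List[str]:
--     c: Counter = Counter()
--     for _t in s.split(','):
--         c[_t] += 1
--
--     res = set()
--     for target, amount in c.items():
--         if amount > 1:
--             res.add(f'{target}_{amount}')
--         else:
--             res.add(target)
--
--     return sorted(res)
-- ===== SOURCE B (Python) =====
-- def get_tags_with_amount(s: str):
--     # sort the tokens once, then count each run of equal tokens with a two-pointer scan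
--     parts = sorted(s.split(','))
--     res = set()
--     i, n = 0, len(parts)
--     while i < n:
--         j = i + 1
--         while j < n and parts[j] == parts[i]:
--             j += 1
--         cnt = j - i
--         res.add(parts[i] if cnt == 1 else f'{parts[i]}_{cnt}')
--         i = j
--     return sorted(res)
-- ===== Notes on version B (the rewrite author's own statement) =====
-- stated objective: alternative
-- what changed: Replaces the Counter hash-count plus set-of-tags pass by sort-first counting: the split tokens are sorted once and runs of equal tokens are counted with a two-pointer scan, each run emitting its tag into the set.
import Mathlib
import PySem

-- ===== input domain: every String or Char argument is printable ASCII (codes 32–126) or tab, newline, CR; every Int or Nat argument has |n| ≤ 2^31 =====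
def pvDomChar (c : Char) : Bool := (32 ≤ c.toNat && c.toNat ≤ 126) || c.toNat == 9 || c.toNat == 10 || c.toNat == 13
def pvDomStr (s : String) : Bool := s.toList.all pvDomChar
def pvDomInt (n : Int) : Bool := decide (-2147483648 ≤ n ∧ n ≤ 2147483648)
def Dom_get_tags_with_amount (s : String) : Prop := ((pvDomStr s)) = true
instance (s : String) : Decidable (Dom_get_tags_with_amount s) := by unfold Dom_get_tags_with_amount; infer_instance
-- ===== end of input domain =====

-- B counts tokens by sorting them first and scanning runs of equal tokens (two-pointer scan),
-- instead of A's Counter hash-count; same result, stated objective: alternative decomposition.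

-- ===== PORT A =====
def get_tags_with_amount (s : String) : List String :=
  let c := ((PySem.Str.split? s ",").getD []).foldl (fun d t => d.modify t 0 (· + 1)) PySem.Dict.empty
  let res := c.items.foldl
    (fun r p => if p.2 > 1 then PySem.Set.add r (p.1 ++ "_" ++ PySem.Int.toStr p.2)
                else PySem.Set.add r p.1) PySem.Set.empty
  PySem.List.sorted res (fun x => x) false

-- ===== PORT B =====
-- transcription of Source B's inner two-pointer while loop: the inner 'while parts[j] == parts[i]'
-- computes the run 'takeWhile (· == x)', cnt = j - i = 1 + run.length, and i jumps to j (= dropWhile);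
-- exact on every input.
def pvRuns (l : List String) : List (String × Int) :=
  match l with
  | [] => []
  | x :: xs =>
      (x, (1 + (xs.takeWhile (· == x)).length : Int)) :: pvRuns (xs.dropWhile (· == x))
termination_by l.length
decreasing_by
  simp only [List.length_cons]
  exact Nat.lt_succ_of_le (List.length_dropWhile_le _ _)

def get_tags_with_amount_alt (s : String) : List String :=
  let parts := PySem.List.sorted ((PySem.Str.split? s ",").getD []) (fun x => x) false
  let res := (pvRuns parts).foldl
    (fun r p => PySem.Set.add r (if p.2 = 1 then p.1 else p.1 ++ "_" ++ PySem.Int.toStr p.2))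
    PySem.Set.empty
  PySem.List.sorted res (fun x => x) false

-- ===== PRECONDITION & SPEC =====
def Spec_get_tags_with_amount (s : String) (out : List String) : Prop := out = get_tags_with_amount_alt s
instance (s : String) (out : List String) : Decidable (Spec_get_tags_with_amount s out) := by unfold Spec_get_tags_with_amount; infer_instance

-- ===== CLAIM (what is proved, stated in full; the proofs are below) =====
def Claim_equal_get_tags_with_amount : Prop := ∀ (s : String), Dom_get_tags_with_amount s → Spec_get_tags_with_amount s (get_tags_with_amount s)

-- ===== LEMMAS AND PROOFS =====

-- tag builders (proof-side abbreviations for the two fold bodies)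
def pvTagA (p : String × Int) : String := if p.2 > 1 then p.1 ++ "_" ++ PySem.Int.toStr p.2 else p.1
def pvTagB (p : String × Int) : String := if p.2 = 1 then p.1 else p.1 ++ "_" ++ PySem.Int.toStr p.2

-- in a ≤-sorted list, nothing equal to the head survives dropWhile (· == head)
theorem pv_not_mem_dropWhile (x : String) (xs : List String)
    (hs : (x :: xs).Pairwise (· ≤ ·)) : x ∉ xs.dropWhile (· == x) := by
  intro hx
  cases hdd : xs.dropWhile (· == x) with
  | nil => rw [hdd] at hx; simp at hx
  | cons h t =>
    rw [hdd] at hx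
    have hne : ¬ (h = x) := by
      have hh := List.head?_dropWhile_not (· == x) xs
      rw [hdd] at hh
      simpa using hh
    have hsubl : (h :: t).Sublist xs := hdd ▸ List.dropWhile_sublist (l := xs) (· == x)
    have hxh : x ≤ h := (List.rel_of_pairwise_cons hs) (hsubl.mem (List.mem_cons_self ..))
    rcases List.mem_cons.mp hx with h1 | h2
    · exact hne (h1 ▸ rfl)
    · have hps : (h :: t).Pairwise (· ≤ ·) :=
        (hs.sublist (hsubl.cons_cons x |>.trans (List.Sublist.refl _))).of_cons.sublist
          (List.Sublist.refl _) |>.sublist (List.Sublist.refl _)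
      have hhx : h ≤ x := (List.rel_of_pairwise_cons hps) h2
      exact hne (le_antisymm hhx hxh)

theorem pvRuns_mem (l : List String) (k : String) (n : Int) :
    l.Pairwise (· ≤ ·) → ((k, n) ∈ pvRuns l ↔ k ∈ l ∧ n = (l.count k : Int)) := by
  induction l using pvRuns.induct with
  | case1 => intro _; simp [pvRuns]
  | case2 x xs ih =>
    intro hs
    have hxs : xs.Pairwise (· ≤ ·) := hs.of_cons
    have hd : (xs.dropWhile (· == x)).Pairwise (· ≤ ·) :=
      hxs.sublist (List.dropWhile_sublist _)
    have hsplit : xs.takeWhile (· == x) ++ xs.dropWhile (· == x) = xs :=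
      List.takeWhile_append_dropWhile
    have htall : ∀ a ∈ xs.takeWhile (· == x), a = x := by
      intro a ha
      have h := List.mem_takeWhile_imp (p := (· == x)) ha
      exact eq_of_beq h
    have hxd : x ∉ xs.dropWhile (· == x) := pv_not_mem_dropWhile x xs hs
    have hxsc : xs.count x = (xs.takeWhile (· == x)).count x + (xs.dropWhile (· == x)).count x := by
      conv_lhs => rw [← hsplit]
      rw [List.count_append]
    have hcx : (x :: xs).count x = 1 + (xs.takeWhile (· == x)).length := by
      rw [List.count_cons_self, hxsc]
      have h1 : (xs.takeWhile (· == x)).count x = (xs.takeWhile (· == x)).length :=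
        List.count_eq_length.mpr (fun b hb => by rw [htall b hb])
      have h2 : (xs.dropWhile (· == x)).count x = 0 := List.count_eq_zero.mpr hxd
      omega
    have hck : ∀ (k' : String), k' ≠ x → (x :: xs).count k' = (xs.dropWhile (· == x)).count k' := by
      intro k' hk
      have hxsc' : xs.count k' = (xs.takeWhile (· == x)).count k' + (xs.dropWhile (· == x)).count k' := by
        conv_lhs => rw [← hsplit]
        rw [List.count_append]
      have h1 : (xs.takeWhile (· == x)).count k' = 0 :=
        List.count_eq_zero.mpr (fun hmem => hk (htall _ hmem))
      have h3 : (x :: xs).count k' = xs.count k' := by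
        rw [List.count_cons]
        simp [beq_eq_false_iff_ne.mpr (fun h : x = k' => hk h.symm)]
      omega
    rw [pvRuns]
    simp only [List.mem_cons, Prod.mk.injEq]
    constructor
    · rintro (⟨hk, hn⟩ | hmem)
      · subst hk
        refine ⟨Or.inl rfl, ?_⟩
        rw [hcx]; push_cast; omega
      · obtain ⟨hkd, hn⟩ := (ih hd).mp hmem
        have hkx : k ≠ x := fun h => hxd (h ▸ hkd)
        have hkxs : k ∈ xs := by
          rw [← hsplit]; exact List.mem_append_right _ hkd
        exact ⟨Or.inr hkxs, by rw [hck k hkx]; exact hn⟩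
    · rintro ⟨hmem, hn⟩
      by_cases hkx : k = x
      · subst hkx
        exact Or.inl ⟨rfl, by rw [hcx] at hn; push_cast at hn ⊢; omega⟩
      · right
        have hkxs : k ∈ xs := by
          rcases hmem with h | h
          · exact absurd h hkx
          · exact h
        have hkd : k ∈ xs.dropWhile (· == x) := by
          rw [← hsplit] at hkxs
          rcases List.mem_append.mp hkxs with h | h
          · exact absurd (htall _ h) hkx
          · exact h
        exact (ih hd).mpr ⟨hkd, by rw [← hck k hkx]; exact hn⟩

theorem pvRuns_keys_nodup (l : List String) :
    l.Pairwise (· ≤ ·) → ((pvRuns l).map Prod.fst).Nodup := by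
  induction l using pvRuns.induct with
  | case1 => intro _; simp [pvRuns]
  | case2 x xs ih =>
    intro hs
    have hd : (xs.dropWhile (· == x)).Pairwise (· ≤ ·) :=
      hs.of_cons.sublist (List.dropWhile_sublist _)
    rw [pvRuns]
    simp only [List.map_cons, List.nodup_cons]
    refine ⟨?_, ih hd⟩
    intro hmem
    obtain ⟨⟨k, n⟩, hp, hfst⟩ := List.mem_map.mp hmem
    have hmemk := ((pvRuns_mem _ k n hd).mp hp).1
    have hk : k = x := hfst
    exact pv_not_mem_dropWhile x xs hs (hk ▸ hmemk)

-- pvRuns of the sorted token list is, up to permutation, Counter's items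
theorem pvRuns_perm_items (toks : List String) :
    (pvRuns (PySem.List.sorted toks (fun x => x) false)).Perm
      ((PySem.Set.ofList toks).map (fun k => (k, (toks.count k : Int)))) := by
  have hperm : (PySem.List.sorted toks (fun x => x) false).Perm toks :=
    PySem.List.sorted_perm toks _ false
  have hsort : (PySem.List.sorted toks (fun x => x) false).Pairwise (· ≤ ·) := by
    simpa using PySem.List.sorted_pairwise toks (fun x => x)
  have hinj : Function.Injective (fun k : String => (k, (toks.count k : Int))) := by
    intro a b h; exact congrArg Prod.fst h
  refine (List.perm_ext_iff_of_nodup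
    (List.Nodup.of_map Prod.fst (pvRuns_keys_nodup _ hsort))
    ((PySem.Set.nodup_ofList toks).map hinj)).mpr ?_
  rintro ⟨k, n⟩
  rw [pvRuns_mem _ k n hsort]
  constructor
  · rintro ⟨hm, hn⟩
    refine List.mem_map.mpr ⟨k, (PySem.Set.mem_ofList toks k).mpr (hperm.mem_iff.mp hm), ?_⟩
    simp only [Prod.mk.injEq]
    exact ⟨trivial, by rw [hn, hperm.count_eq]⟩
  · intro hm
    obtain ⟨a, ha, hak⟩ := List.mem_map.mp hm
    simp only [Prod.mk.injEq] at hak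
    obtain ⟨h1, h2⟩ := hak
    subst h1
    exact ⟨hperm.mem_iff.mpr ((PySem.Set.mem_ofList toks a).mp ha), by rw [hperm.count_eq]; exact h2.symm⟩

-- ===== VERDICT (by name: the statement is the Claim_ definition above) =====
theorem get_tags_with_amount_spec : Claim_equal_get_tags_with_amount := by
  intro s _
  unfold Spec_get_tags_with_amount get_tags_with_amount get_tags_with_amount_alt
  set toks := (PySem.Str.split? s ",").getD [] with htoks
  -- A's counting loop is Counter(toks)
  rw [← PySem.Dict.counter_eq_foldl]
  -- both set-building folds are ofList of a mapped list
  have hA : (PySem.Dict.counter toks).items.foldl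
      (fun r p => if p.2 > 1 then PySem.Set.add r (p.1 ++ "_" ++ PySem.Int.toStr p.2)
                  else PySem.Set.add r p.1) PySem.Set.empty
      = PySem.Set.ofList ((PySem.Dict.counter toks).items.map pvTagA) := by
    have hfun : (fun (r : PySem.Set String) (p : String × Int) =>
        if p.2 > 1 then PySem.Set.add r (p.1 ++ "_" ++ PySem.Int.toStr p.2)
        else PySem.Set.add r p.1)
        = fun r p => PySem.Set.add r (pvTagA p) := by
      funext r p
      by_cases h : p.2 > 1 <;> simp [pvTagA, h]
    rw [hfun, ← PySem.Set.update_map_eq_foldl_add, PySem.Set.update_empty]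
  have hB : (pvRuns (PySem.List.sorted toks (fun x => x) false)).foldl
      (fun r p => PySem.Set.add r (if p.2 = 1 then p.1 else p.1 ++ "_" ++ PySem.Int.toStr p.2))
      PySem.Set.empty
      = PySem.Set.ofList ((pvRuns (PySem.List.sorted toks (fun x => x) false)).map pvTagB) := by
    rw [show (fun (r : PySem.Set String) (p : String × Int) =>
        PySem.Set.add r (if p.2 = 1 then p.1 else p.1 ++ "_" ++ PySem.Int.toStr p.2))
        = fun r p => PySem.Set.add r (pvTagB p) from rfl,
      ← PySem.Set.update_map_eq_foldl_add, PySem.Set.update_empty]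
  simp only at hA hB ⊢
  rw [hA, hB, PySem.Dict.items_counter]
  -- it remains to show the two tag sets are permutations
  rw [PySem.List.sorted_id_eq_sorted_id_iff_perm]
  -- on every run of the sorted list the count is ≥ 1, so pvTagB = pvTagA there
  have hmapeq : ((pvRuns (PySem.List.sorted toks (fun x => x) false)).map pvTagB)
      = ((pvRuns (PySem.List.sorted toks (fun x => x) false)).map pvTagA) := by
    apply List.map_congr_left
    rintro ⟨k, n⟩ hp
    have hsort : (PySem.List.sorted toks (fun x => x) false).Pairwise (· ≤ ·) := by
      simpa using PySem.List.sorted_pairwise toks (fun x => x)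
    obtain ⟨hm, hn⟩ := (pvRuns_mem _ k n hsort).mp hp
    have hpos : 0 < (PySem.List.sorted toks (fun x => x) false).count k :=
      List.count_pos_iff.mpr hm
    simp only [pvTagA, pvTagB]
    by_cases h1 : n = 1
    · simp [h1]
    · have : n > 1 := by omega
      simp [h1, this]
  have hperm2 : ((pvRuns (PySem.List.sorted toks (fun x => x) false)).map pvTagA).Perm
      (((PySem.Set.ofList toks).map (fun k => (k, (toks.count k : Int)))).map pvTagA) :=
    (pvRuns_perm_items toks).map pvTagA
  have hperm3 : (((PySem.Set.ofList toks).map (fun k => (k, (toks.count k : Int)))).map pvTagA)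
      = ((PySem.Set.ofList toks).map (fun k => pvTagA (k, (toks.count k : Int)))) := by
    rw [List.map_map]; rfl
  have hfinal : (((PySem.Set.ofList toks).map (fun k => (k, (toks.count k : Int)))).map pvTagA).Perm
      ((pvRuns (PySem.List.sorted toks (fun x => x) false)).map pvTagB) := by
    rw [hmapeq]; exact hperm2.symm
  -- ofList of permuted lists are permutations (both nodup, same members)
  refine (List.perm_ext_iff_of_nodup (PySem.Set.nodup_ofList _) (PySem.Set.nodup_ofList _)).mpr ?_
  intro a
  rw [PySem.Set.mem_ofList, PySem.Set.mem_ofList]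
  constructor
  · intro h; exact hfinal.mem_iff.mp (by simpa [pvTagA] using h)
  · intro h; simpa [pvTagA] using hfinal.mem_iff.mpr h
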